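-- pv_equiv track=rewrite | github.com/autonomxDeveloper/omnix | src/app/rpg/memory/npc_memory_recall.py | memory_reference_is_backed
-- ===== SOURCE A (Python) =====
-- from typing import Any, Dict, List
--
-- def _safe_str(value: Any) -> str:
--     return "" if value is None else str(value)
--
-- def _safe_dict(value: Any) -> Dict[str, Any]:
--     return value if isinstance(value, dict) else {}
--
-- def memory_reference_is_backed(
--     line: str,
--     recalled_memories: List[Dict[str, Any]],
-- ) -> bool:
--     lower = _safe_str(line).lower()
--     if not lower:
--         return True
--
--     markers = (
--         "remember",
--         "last time",
--         "again",
--         "before",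
--         "earlier",
--         "still short",
--         "short on coin",
--         "you bought",
--         "you tried",
--         "you asked",
--     )
--     if not any(marker in lower for marker in markers):
--         return True
--
--     if not recalled_memories:
--         return False
--
--     for memory in recalled_memories:
--         memory = _safe_dict(memory)
--         kind = _safe_str(memory.get("kind"))
--         summary = _safe_str(memory.get("summary")).lower()
--         blocked_reason = _safe_str(memory.get("blocked_reason"))
--
--         if "short" in lower and blocked_reason == "insufficient_funds":
--             return True
--         if "coin" in lower and blocked_reason == "insufficient_funds":
--             return True
--         if "bought" in lower and kind == "service_purchase":
--             return True
--         if "tried" in lower and kind in {"service_purchase_blocked", "social_negative"}: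
--             return True
--         if "asked" in lower and kind in {"service_inquiry", "social_interaction"}:
--             return True
--         if summary and any(token in summary for token in lower.split() if len(token) > 5):
--             return True
--
--     generic_terms = ("again", "before", "earlier", "last time", "remember")
--     specific_terms = ("short", "coin", "bought", "paid", "purchased", "failed", "tried")
--     if any(term in lower for term in generic_terms) and not any(term in lower for term in specific_terms):
--         return bool(recalled_memories)
--
--     return False
-- ===== SOURCE B (Python) =====
-- from typing import Any, Dict, List
--
--
-- def _safe_str(value: Any) -> str:
--     return "" if value is None else str(value)
--
--
-- def _safe_dict(value: Any) -> Dict[str, Any]: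
--     return value if isinstance(value, dict) else {}
--
--
-- def memory_reference_is_backed(
--     line: str,
--     recalled_memories: List[Dict[str, Any]],
-- ) -> bool:
--     lower = _safe_str(line).lower()
--     if not lower:
--         return True
--
--     markers = (
--         "remember",
--         "last time",
--         "again",
--         "before",
--         "earlier",
--         "still short",
--         "short on coin",
--         "you bought",
--         "you tried",
--         "you asked",
--     )
--     if not any(marker in lower for marker in markers):
--         return True
--
--     if not recalled_memories:
--         return False
--
--     # One aggregation over the memories, then a flat decision.
--     kinds = {_safe_str(_safe_dict(m).get("kind")) for m in recalled_memories}
--     reasons = {_safe_str(_safe_dict(m).get("blocked_reason")) for m in recalled_memories}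
--     summaries = [s for s in (_safe_str(_safe_dict(m).get("summary")).lower() for m in recalled_memories) if s]
--     tokens = [t for t in lower.split() if len(t) > 5]
--
--     if ("short" in lower or "coin" in lower) and "insufficient_funds" in reasons:
--         return True
--     if "bought" in lower and "service_purchase" in kinds:
--         return True
--     if "tried" in lower and ("service_purchase_blocked" in kinds or "social_negative" in kinds):
--         return True
--     if "asked" in lower and ("service_inquiry" in kinds or "social_interaction" in kinds):
--         return True
--     if any(t in s for s in summaries for t in tokens):
--         return True
--
--     generic_terms = ("again", "before", "earlier", "last time", "remember")
--     specific_terms = ("short", "coin", "bought", "paid", "purchased", "failed", "tried")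
--     return any(term in lower for term in generic_terms) and not any(
--         term in lower for term in specific_terms
--     )
-- ===== Notes on version B (the rewrite author's own statement) =====
-- stated objective: alternative
-- what changed: B replaces A's per-memory if-ladder with early return by a single aggregation pass (set of kinds, set of blocked_reasons, list of non-empty lowered summaries) followed by a flat sequence of membership checks; correctness relies on the result being order-independent.
import Mathlib
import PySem

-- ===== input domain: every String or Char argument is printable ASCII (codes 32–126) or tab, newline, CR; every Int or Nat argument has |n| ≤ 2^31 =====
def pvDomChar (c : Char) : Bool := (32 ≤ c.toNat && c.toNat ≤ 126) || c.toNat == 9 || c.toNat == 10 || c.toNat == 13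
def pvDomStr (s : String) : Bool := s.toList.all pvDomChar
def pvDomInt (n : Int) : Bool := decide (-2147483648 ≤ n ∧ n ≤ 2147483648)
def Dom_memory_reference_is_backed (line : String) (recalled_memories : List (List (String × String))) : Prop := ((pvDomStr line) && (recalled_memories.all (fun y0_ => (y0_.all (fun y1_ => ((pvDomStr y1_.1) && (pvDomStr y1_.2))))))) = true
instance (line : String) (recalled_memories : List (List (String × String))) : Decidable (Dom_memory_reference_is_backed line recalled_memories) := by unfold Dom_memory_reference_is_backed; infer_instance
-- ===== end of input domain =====

-- B replaces A's per-memory if-ladder by one aggregation pass (kind set, blocked_reason set,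
-- non-empty lowered summaries) followed by a flat decision; objective: alternative decomposition.

-- shared module helpers (_safe_str(memory.get(k)) on a string-valued dict)
def pvSafeGet (memory : List (String × String)) (k : String) : String :=
  ((PySem.Dict.mk memory).get? k).getD ""

def pvMarkers : List String :=
  ["remember", "last time", "again", "before", "earlier", "still short",
   "short on coin", "you bought", "you tried", "you asked"]

def pvGenericHit (lower : String) : Bool :=
  (["again", "before", "earlier", "last time", "remember"].any fun t => PySem.Str.isIn t lower) &&
  !(["short", "coin", "bought", "paid", "purchased", "failed", "tried"].any fun t => PySem.Str.isIn t lower)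

-- ===== PORT A =====
def pvMemHit (lower : String) (memory : List (String × String)) : Bool :=
  let kind := pvSafeGet memory "kind"
  let summary := PySem.Str.lower (pvSafeGet memory "summary")
  let blocked := pvSafeGet memory "blocked_reason"
  (PySem.Str.isIn "short" lower && blocked == "insufficient_funds") ||
  (PySem.Str.isIn "coin" lower && blocked == "insufficient_funds") ||
  (PySem.Str.isIn "bought" lower && kind == "service_purchase") ||
  (PySem.Str.isIn "tried" lower && (kind == "service_purchase_blocked" || kind == "social_negative")) ||
  (PySem.Str.isIn "asked" lower && (kind == "service_inquiry" || kind == "social_interaction")) ||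
  (summary != "" &&
    (((PySem.Str.split₀ lower).filter fun t => 5 < PySem.Str.len t).any fun t => PySem.Str.isIn t summary))

def memory_reference_is_backed (line : String) (recalled_memories : List (List (String × String))) : Bool :=
  let lower := PySem.Str.lower line
  if lower == "" then true
  else if !(pvMarkers.any fun m => PySem.Str.isIn m lower) then true
  else if recalled_memories.isEmpty then false
  else if recalled_memories.any (pvMemHit lower) then true
  else if pvGenericHit lower then !recalled_memories.isEmpty
  else false

-- ===== PORT B =====
def memory_reference_is_backed_alt (line : String) (recalled_memories : List (List (String × String))) : Bool :=
  let lower := PySem.Str.lower line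
  if lower == "" then true
  else if !(pvMarkers.any fun m => PySem.Str.isIn m lower) then true
  else if recalled_memories.isEmpty then false
  else
    let kinds := PySem.Set.ofList (recalled_memories.map fun m => pvSafeGet m "kind")
    let reasons := PySem.Set.ofList (recalled_memories.map fun m => pvSafeGet m "blocked_reason")
    let summaries := (recalled_memories.map fun m => PySem.Str.lower (pvSafeGet m "summary")).filter fun s => s != ""
    let tokens := (PySem.Str.split₀ lower).filter fun t => 5 < PySem.Str.len t
    if (PySem.Str.isIn "short" lower || PySem.Str.isIn "coin" lower) && PySem.Set.contains reasons "insufficient_funds" then true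
    else if PySem.Str.isIn "bought" lower && PySem.Set.contains kinds "service_purchase" then true
    else if PySem.Str.isIn "tried" lower && (PySem.Set.contains kinds "service_purchase_blocked" || PySem.Set.contains kinds "social_negative") then true
    else if PySem.Str.isIn "asked" lower && (PySem.Set.contains kinds "service_inquiry" || PySem.Set.contains kinds "social_interaction") then true
    else if summaries.any fun s => tokens.any fun t => PySem.Str.isIn t s then true
    else pvGenericHit lower

-- ===== PRECONDITION & SPEC =====
def Spec_memory_reference_is_backed (line : String) (recalled_memories : List (List (String × String))) (out : Bool) : Prop := out = memory_reference_is_backed_alt line recalled_memories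
instance (line : String) (recalled_memories : List (List (String × String))) (out : Bool) : Decidable (Spec_memory_reference_is_backed line recalled_memories out) := by unfold Spec_memory_reference_is_backed; infer_instance

-- ===== CLAIM (what is proved, stated in full; the proofs are below) =====
def Claim_equal_memory_reference_is_backed : Prop := ∀ (line : String) (recalled_memories : List (List (String × String))), Dom_memory_reference_is_backed line recalled_memories → Spec_memory_reference_is_backed line recalled_memories (memory_reference_is_backed line recalled_memories)

-- ===== LEMMAS AND PROOFS =====

theorem pv_chain (c1 c2 c3 c4 c5 fb : Bool) :
    (if c1 || c2 || c3 || c4 || c5 then true else fb)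
      = (if c1 then true else if c2 then true else if c3 then true else if c4 then true
         else if c5 then true else fb) := by
  cases c1 <;> cases c2 <;> cases c3 <;> cases c4 <;> cases c5 <;> simp

theorem pv_any_memHit (lower : String) (rm : List (List (String × String))) :
    rm.any (pvMemHit lower)
      = ((PySem.Str.isIn "short" lower || PySem.Str.isIn "coin" lower)
            && PySem.Set.contains (PySem.Set.ofList (rm.map fun m => pvSafeGet m "blocked_reason")) "insufficient_funds"
        || PySem.Str.isIn "bought" lower
            && PySem.Set.contains (PySem.Set.ofList (rm.map fun m => pvSafeGet m "kind")) "service_purchase"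
        || PySem.Str.isIn "tried" lower
            && (PySem.Set.contains (PySem.Set.ofList (rm.map fun m => pvSafeGet m "kind")) "service_purchase_blocked"
                || PySem.Set.contains (PySem.Set.ofList (rm.map fun m => pvSafeGet m "kind")) "social_negative")
        || PySem.Str.isIn "asked" lower
            && (PySem.Set.contains (PySem.Set.ofList (rm.map fun m => pvSafeGet m "kind")) "service_inquiry"
                || PySem.Set.contains (PySem.Set.ofList (rm.map fun m => pvSafeGet m "kind")) "social_interaction")
        || ((rm.map fun m => PySem.Str.lower (pvSafeGet m "summary")).filter fun s => s != "").any
              (fun s => ((PySem.Str.split₀ lower).filter fun t => 5 < PySem.Str.len t).any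
                  fun t => PySem.Str.isIn t s)) := by
  rw [Bool.eq_iff_iff]
  simp only [pvMemHit, List.any_eq_true, PySem.Set.contains_iff, PySem.Set.mem_ofList,
    List.mem_map, List.mem_filter, Bool.or_eq_true, Bool.and_eq_true, bne_iff_ne, ne_eq,
    beq_iff_eq]
  constructor
  · rintro ⟨m, hm, h⟩
    rcases h with ((((⟨h1, h2⟩ | ⟨h1, h2⟩) | ⟨h1, h2⟩) | ⟨h1, h2⟩) | ⟨h1, h2⟩) | ⟨h1, h2⟩
    · exact Or.inl (Or.inl (Or.inl (Or.inl ⟨Or.inl h1, ⟨m, hm, h2⟩⟩)))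
    · exact Or.inl (Or.inl (Or.inl (Or.inl ⟨Or.inr h1, ⟨m, hm, h2⟩⟩)))
    · exact Or.inl (Or.inl (Or.inl (Or.inr ⟨h1, ⟨m, hm, h2⟩⟩)))
    · exact Or.inl (Or.inl (Or.inr ⟨h1, h2.imp (fun h => ⟨m, hm, h⟩) (fun h => ⟨m, hm, h⟩)⟩))
    · exact Or.inl (Or.inr ⟨h1, h2.imp (fun h => ⟨m, hm, h⟩) (fun h => ⟨m, hm, h⟩)⟩)
    · exact Or.inr ⟨PySem.Str.lower (pvSafeGet m "summary"), ⟨⟨m, hm, rfl⟩, h1⟩, h2⟩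
  · rintro ((((⟨h1, m, hm, h2⟩ | ⟨h1, h2⟩) | ⟨h1, h2⟩) | ⟨h1, h2⟩) | ⟨s, ⟨⟨m, hm, hs⟩, hne⟩, ht⟩)
    · refine ⟨m, hm, ?_⟩
      rcases h1 with h1 | h1
      · exact Or.inl (Or.inl (Or.inl (Or.inl (Or.inl ⟨h1, h2⟩))))
      · exact Or.inl (Or.inl (Or.inl (Or.inl (Or.inr ⟨h1, h2⟩))))
    · obtain ⟨m, hm, h2⟩ := h2
      exact ⟨m, hm, Or.inl (Or.inl (Or.inl (Or.inr ⟨h1, h2⟩)))⟩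
    · rcases h2 with ⟨m, hm, h2⟩ | ⟨m, hm, h2⟩
      · exact ⟨m, hm, Or.inl (Or.inl (Or.inr ⟨h1, Or.inl h2⟩))⟩
      · exact ⟨m, hm, Or.inl (Or.inl (Or.inr ⟨h1, Or.inr h2⟩))⟩
    · rcases h2 with ⟨m, hm, h2⟩ | ⟨m, hm, h2⟩
      · exact ⟨m, hm, Or.inl (Or.inr ⟨h1, Or.inl h2⟩)⟩
      · exact ⟨m, hm, Or.inl (Or.inr ⟨h1, Or.inr h2⟩)⟩
    · subst hs
      exact ⟨m, hm, Or.inr ⟨hne, ht⟩⟩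

-- ===== VERDICT (by name: the statement is the Claim_ definition above) =====
theorem memory_reference_is_backed_spec : Claim_equal_memory_reference_is_backed := by
  intro line rm _
  unfold Spec_memory_reference_is_backed memory_reference_is_backed memory_reference_is_backed_alt
  simp only [pv_any_memHit]
  rw [pv_chain]
  cases hE : rm.isEmpty <;> cases hG : pvGenericHit (PySem.Str.lower line) <;> simp
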